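-- pv_equiv track=rewrite | github.com/InvalidCS/eulertools | prime.py | _eff_route
-- ===== SOURCE A (Python) =====
-- def _eff_route(d: int) -> list:
--     eff_list = []
--     first1 = True
--     while d > 1:
--         if d%2 == 0:
--             d //= 2
--             eff_list.append('2x')
--         else:
--             d -= 1
--             if first1:
--                 eff_list.append('1+d')
--                 first1 = False
--             else:
--                 eff_list.append('1+')
--     return eff_list[::-1]
-- ===== SOURCE B (Python) =====
-- def _eff_route(d: int) -> list:
--     if d <= 1:
--         return []
--     out = []
--     for b in bin(d)[3:]:          # bits of d after the leading 1, MSB-first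
--         out.append('2x')
--         if b == '1':
--             out.append('1+')
--     for i in range(len(out) - 1, -1, -1):   # mark the last add (least-significant set bit)
--         if out[i] == '1+':
--             out[i] = '1+d'
--             break
--     return out
-- ===== Notes on version B (the rewrite author's own statement) =====
-- stated objective: alternative
-- what changed: B builds the route forward from d's binary digits (bin(d)[3:], MSB-first) emitting '2x' per bit and '1+' per set bit, then marks the last add as '1+d' in a backward scan, instead of A's halve/decrement while-loop with a first1 flag and a final reverse.
import Mathlib
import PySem

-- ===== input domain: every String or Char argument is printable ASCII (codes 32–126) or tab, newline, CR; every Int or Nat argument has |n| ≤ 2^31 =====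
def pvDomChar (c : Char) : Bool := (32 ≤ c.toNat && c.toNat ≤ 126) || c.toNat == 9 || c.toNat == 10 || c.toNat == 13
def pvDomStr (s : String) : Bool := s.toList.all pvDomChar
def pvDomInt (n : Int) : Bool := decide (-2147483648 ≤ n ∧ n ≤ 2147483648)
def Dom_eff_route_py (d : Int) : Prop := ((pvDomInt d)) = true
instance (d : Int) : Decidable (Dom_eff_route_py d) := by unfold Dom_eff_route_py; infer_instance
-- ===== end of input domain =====

-- B rebuilds the route forward from d's binary digits (MSB-first) instead of A's
-- halve/decrement loop with a final reverse; equal return value for every Int d (both total).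

-- ===== PORT A =====
-- the while-loop of _eff_route: state (d, first1, eff_list)
def effLoop (d : Int) (first1 : Bool) (acc : List String) : List String :=
  if _h : d > 1 then
    if PySem.Int.mod d 2 = 0 then
      effLoop (PySem.Int.floordiv d 2) first1 (acc ++ ["2x"])
    else
      if first1 then effLoop (d - 1) false (acc ++ ["1+d"])
      else effLoop (d - 1) false (acc ++ ["1+"])
  else acc
termination_by d.toNat
decreasing_by
  · rw [PySem.Int.floordiv_eq_ediv_of_pos (by omega)]; omega
  · omega
  · omega

-- eff_list[::-1] is List.reverse (PySem.List.slice?_none_none_neg_one)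
def eff_route_py (d : Int) : List String := (effLoop d true []).reverse

-- ===== PORT B =====
-- bin(n) without the "0b" prefix: binary digit characters of n, MSB first
def pvBinDigits (n : Nat) : List Char :=
  if n < 2 then [if n = 1 then '1' else '0']
  else pvBinDigits (n / 2) ++ [if n % 2 = 1 then '1' else '0']

-- B's backward for-loop over range(len(out)-1, -1, -1) with break: scanning out from the
-- right and replacing the FIRST "1+" found = scan out.reverse from the left, then reverse back
def markFromRight (xs : List String) : List String :=
  match xs with
  | [] => []
  | x :: rest => if x = "1+" then "1+d" :: rest else x :: markFromRight rest

def eff_route_py_alt (d : Int) : List String :=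
  if d ≤ 1 then []
  else
    let out := ((pvBinDigits d.toNat).drop 1).foldl
      (fun out b => if b = '1' then out ++ ["2x", "1+"] else out ++ ["2x"]) []
    (markFromRight out.reverse).reverse

-- ===== PRECONDITION & SPEC =====
def Spec_eff_route_py (d : Int) (out : List String) : Prop := out = eff_route_py_alt d
instance (d : Int) (out : List String) : Decidable (Spec_eff_route_py d out) := by unfold Spec_eff_route_py; infer_instance

-- ===== CLAIM (what is proved, stated in full; the proofs are below) =====
def Claim_equal_eff_route_py : Prop := ∀ (d : Int), Dom_eff_route_py d → Spec_eff_route_py d (eff_route_py d)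

-- ===== LEMMAS AND PROOFS =====

-- the route with every add written "1+" (what A's loop emits once first1 is false), MSB-first
def pvF (n : Nat) : List String :=
  if n < 2 then [] else pvF (n / 2) ++ (if n % 2 = 1 then ["2x", "1+"] else ["2x"])

-- replace the last "1+" of xs by "1+d"
def pvMark (xs : List String) : List String := (markFromRight xs.reverse).reverse

theorem pvMark_2x (xs : List String) : pvMark (xs ++ ["2x"]) = pvMark xs ++ ["2x"] := by
  simp [pvMark, markFromRight]

theorem pvMark_add (xs : List String) : pvMark (xs ++ ["1+"]) = xs ++ ["1+d"] := by
  simp [pvMark, markFromRight]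

theorem effLoop_step_even (d : Int) (b : Bool) (acc : List String)
    (h : 1 < d) (hm : PySem.Int.mod d 2 = 0) :
    effLoop d b acc = effLoop (PySem.Int.floordiv d 2) b (acc ++ ["2x"]) := by
  conv_lhs => rw [effLoop]
  rw [dif_pos h, if_pos hm]

theorem effLoop_step_odd_true (d : Int) (acc : List String)
    (h : 1 < d) (hm : ¬ PySem.Int.mod d 2 = 0) :
    effLoop d true acc = effLoop (d - 1) false (acc ++ ["1+d"]) := by
  conv_lhs => rw [effLoop]
  rw [dif_pos h, if_neg hm, if_pos rfl]

theorem effLoop_step_odd_false (d : Int) (acc : List String)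
    (h : 1 < d) (hm : ¬ PySem.Int.mod d 2 = 0) :
    effLoop d false acc = effLoop (d - 1) false (acc ++ ["1+"]) := by
  conv_lhs => rw [effLoop]
  rw [dif_pos h, if_neg hm, if_neg (by decide)]

theorem effLoop_base (d : Int) (b : Bool) (acc : List String) (h : ¬ 1 < d) :
    effLoop d b acc = acc := by
  conv_lhs => rw [effLoop]
  rw [dif_neg h]

theorem mod_two_cases (d : Int) (hd : 1 < d) :
    (PySem.Int.mod d 2 = 0 ∧ d.toNat % 2 = 0 ∧ (PySem.Int.floordiv d 2).toNat = d.toNat / 2)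
    ∨ (PySem.Int.mod d 2 ≠ 0 ∧ d.toNat % 2 = 1 ∧ 3 ≤ d.toNat) := by
  rw [PySem.Int.mod_eq_emod_of_pos (by omega), PySem.Int.floordiv_eq_ediv_of_pos (by omega)]
  omega

theorem effLoop_acc_aux (n : Nat) : ∀ (d : Int), d.toNat ≤ n → ∀ (b : Bool) (acc : List String),
    effLoop d b acc = acc ++ effLoop d b [] := by
  induction n with
  | zero =>
    intro d hd b acc
    rw [effLoop_base _ _ _ (by omega), effLoop_base _ _ _ (by omega)]; simp
  | succ n ih =>
    intro d hd b acc
    by_cases h : 1 < d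
    · by_cases hm : PySem.Int.mod d 2 = 0
      · have hlt : (PySem.Int.floordiv d 2).toNat ≤ n := by
          rw [PySem.Int.floordiv_eq_ediv_of_pos (by omega)]; omega
        rw [effLoop_step_even d b acc h hm, effLoop_step_even d b [] h hm,
          ih _ hlt, ih _ hlt _ (([] : List String) ++ ["2x"])]
        simp
      · have hlt : (d - 1).toNat ≤ n := by omega
        cases b
        · rw [effLoop_step_odd_false d acc h hm, effLoop_step_odd_false d [] h hm,
            ih _ hlt, ih _ hlt _ (([] : List String) ++ ["1+"])]
          simp
        · rw [effLoop_step_odd_true d acc h hm, effLoop_step_odd_true d [] h hm,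
            ih _ hlt, ih _ hlt _ (([] : List String) ++ ["1+d"])]
          simp
    · rw [effLoop_base _ _ _ h, effLoop_base _ _ _ h]; simp

theorem effLoop_acc (d : Int) (b : Bool) (acc : List String) :
    effLoop d b acc = acc ++ effLoop d b [] :=
  effLoop_acc_aux d.toNat d le_rfl b acc

-- pvF of the even predecessor of an odd n ≥ 3
theorem pvF_pred_odd (n : Nat) (h3 : 3 ≤ n) (ho : n % 2 = 1) :
    pvF (n - 1) = pvF (n / 2) ++ ["2x"] := by
  rw [pvF, if_neg (by omega), if_neg (by omega), show (n - 1) / 2 = n / 2 by omega]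

theorem effLoop_false_aux (n : Nat) : ∀ (d : Int), d.toNat ≤ n →
    (effLoop d false []).reverse = pvF d.toNat := by
  induction n with
  | zero =>
    intro d hd
    rw [effLoop_base _ _ _ (by omega), pvF, if_pos (by omega)]; rfl
  | succ n ih =>
    intro d hd
    by_cases h : 1 < d
    · rcases mod_two_cases d h with ⟨hm, he, hf⟩ | ⟨hm, ho, h3⟩
      · have hlt : (PySem.Int.floordiv d 2).toNat ≤ n := by omega
        rw [effLoop_step_even d false [] h hm, effLoop_acc, List.nil_append,
          List.reverse_append, ih _ hlt, hf]
        conv_rhs => rw [pvF]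
        rw [if_neg (by omega), if_neg (by omega)]
        simp
      · have hlt : (d - 1).toNat ≤ n := by omega
        rw [effLoop_step_odd_false d [] h hm, effLoop_acc, List.nil_append,
          List.reverse_append, ih _ hlt,
          show (d - 1).toNat = d.toNat - 1 by omega, pvF_pred_odd d.toNat h3 ho]
        conv_rhs => rw [pvF]
        rw [if_neg (by omega), if_pos (by omega)]
        simp
    · rw [effLoop_base _ _ _ h, pvF, if_pos (by omega)]; rfl

theorem effLoop_true_aux (n : Nat) : ∀ (d : Int), d.toNat ≤ n →
    (effLoop d true []).reverse = pvMark (pvF d.toNat) := by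
  induction n with
  | zero =>
    intro d hd
    rw [effLoop_base _ _ _ (by omega), pvF, if_pos (by omega)]; rfl
  | succ n ih =>
    intro d hd
    by_cases h : 1 < d
    · rcases mod_two_cases d h with ⟨hm, he, hf⟩ | ⟨hm, ho, h3⟩
      · have hlt : (PySem.Int.floordiv d 2).toNat ≤ n := by omega
        rw [effLoop_step_even d true [] h hm, effLoop_acc, List.nil_append,
          List.reverse_append, ih _ hlt, hf]
        conv_rhs => rw [pvF]
        rw [if_neg (by omega), if_neg (by omega), pvMark_2x]
        simp
      · have hlt : (d - 1).toNat ≤ n := by omega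
        rw [effLoop_step_odd_true d [] h hm, effLoop_acc, List.nil_append,
          List.reverse_append, effLoop_false_aux n _ hlt,
          show (d - 1).toNat = d.toNat - 1 by omega, pvF_pred_odd d.toNat h3 ho]
        conv_rhs => rw [pvF]
        rw [if_neg (by omega), if_pos (by omega),
          show (["2x", "1+"] : List String) = ["2x"] ++ ["1+"] from rfl, ← List.append_assoc,
          pvMark_add]
        simp
    · rw [effLoop_base _ _ _ h, pvF, if_pos (by omega)]; rfl

theorem pvBinDigits_ne_nil (n : Nat) : pvBinDigits n ≠ [] := by
  rw [pvBinDigits]; split <;> simp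

theorem foldBits (n : Nat) (hn : 1 ≤ n) :
    ((pvBinDigits n).drop 1).foldl
      (fun out b => if b = '1' then out ++ ["2x", "1+"] else out ++ ["2x"]) [] = pvF n := by
  induction n using Nat.strong_induction_on with
  | _ n ih =>
    by_cases h2 : n < 2
    · have h1 : n = 1 := by omega
      subst h1
      rw [pvBinDigits, if_pos (by omega), pvF, if_pos (by omega)]; rfl
    · rw [pvBinDigits, if_neg h2,
        List.drop_append_of_le_length
          (Nat.one_le_iff_ne_zero.mpr (by simpa using pvBinDigits_ne_nil (n / 2))),
        List.foldl_append, ih (n / 2) (by omega) (by omega)]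
      conv_rhs => rw [pvF]
      rw [if_neg h2]
      by_cases ho : n % 2 = 1 <;> simp [ho]

theorem eff_route_py_spec : Claim_equal_eff_route_py := by
  intro d _
  unfold Spec_eff_route_py eff_route_py eff_route_py_alt
  by_cases hd : d ≤ 1
  · rw [if_pos hd, effLoop_base _ _ _ (by omega)]; rfl
  · rw [if_neg hd, effLoop_true_aux d.toNat d le_rfl,
      foldBits d.toNat (by omega)]
    rfl
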